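-- pv_equiv track=rewrite | github.com/xbmc4lyfe/nzbdavkodi | plugin.video.nzbdav/resources/lib/dv_source.py | _read_element_id
-- ===== SOURCE A (Python) =====
-- def _vint_width(first_byte):
--     """Find EBML VINT width from the first byte. Width is the position of the
--     length-descriptor bit (MSB-first). Raises ValueError if no bit is set
--     within the legal 1..8 byte range (malformed or zero-padded input).
--     """
--     mask = 0x80
--     width = 1
--     while width <= 8:
--         if first_byte & mask:
--             return width, mask
--         mask >>= 1
--         width += 1
--     raise ValueError("invalid EBML VINT: no length-descriptor bit in first byte")
--
-- def _read_element_id(data, offset):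
--     """Read an EBML Element ID. Keeps the length-descriptor bit as part of the ID."""
--     width, _ = _vint_width(data[offset])
--     if offset + width > len(data):
--         raise ValueError("EBML Element ID truncated")
--     value = 0
--     for i in range(width):
--         value = (value << 8) | data[offset + i]
--     return value, width
-- ===== SOURCE B (Python) =====
-- def _read_element_id(data, offset):
--     """Read an EBML Element ID. Keeps the length-descriptor bit as part of the ID."""
--     first = data[offset] & 0xFF
--     if first == 0:
--         raise ValueError("invalid EBML VINT: no length-descriptor bit in first byte")
--     width = 9 - first.bit_length()
--     start = offset if offset >= 0 else offset + len(data)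
--     if start + width > len(data):
--         raise ValueError("EBML Element ID truncated")
--     value = 0
--     for b in data[start:start + width]:
--         value = (value << 8) | b
--     return value, width
-- ===== Notes on version B (the rewrite author's own statement) =====
-- stated objective: idiomatic
-- what changed: B replaces the mask-shifting width loop by the closed form width = 9 - (first_byte & 0xFF).bit_length() and accumulates the value by iterating over the slice data[start:start+width] (offset normalized once) instead of indexing data[offset+i] per position. Pre_ excludes (besides A's raises) negative offsets whose read would wrap past the end of the buffer, where A returns a value stitched from the buffer's tail and head via per-index negative indexing while B's normalized truncation check raises ValueError.
-- outside the precondition, e.g. on _read_element_id([7, 64], -1): A returns (16391, 2), B raises ValueError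
import Mathlib
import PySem

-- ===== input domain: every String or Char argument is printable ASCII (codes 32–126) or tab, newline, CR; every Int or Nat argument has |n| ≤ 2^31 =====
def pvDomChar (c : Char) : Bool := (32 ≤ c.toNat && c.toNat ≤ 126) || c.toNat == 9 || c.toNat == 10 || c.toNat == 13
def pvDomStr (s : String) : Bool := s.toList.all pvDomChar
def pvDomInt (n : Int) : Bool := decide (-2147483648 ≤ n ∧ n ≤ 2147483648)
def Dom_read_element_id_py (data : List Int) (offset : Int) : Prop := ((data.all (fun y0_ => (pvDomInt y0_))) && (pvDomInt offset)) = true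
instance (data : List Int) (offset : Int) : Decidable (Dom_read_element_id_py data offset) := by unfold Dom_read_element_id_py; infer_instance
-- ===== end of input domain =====

-- B computes the VINT width by the closed form 9 - (first_byte & 0xFF).bit_length() instead of A's
-- mask-shifting loop, and accumulates the value over the slice data[start:start+width] (offset
-- normalized once) instead of per-index data[offset + i] lookups (objective: idiomatic; return value only).

-- ===== PORT A =====
-- the while loop of _vint_width; fuel 9 covers its at most 8 iterations; none = ValueError
def vintLoop (first_byte mask width : Int) : Nat → Option (Int × Int)
  | 0 => none
  | fuel + 1 =>
    if width ≤ 8 then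
      if PySem.Int.band first_byte mask ≠ 0 then some (width, mask)
      else vintLoop first_byte (mask >>> (1 : Nat)) (width + 1) fuel
    else none

def vint_width (first_byte : Int) : Option (Int × Int) := vintLoop first_byte 128 1 9

def read_element_id_py (data : List Int) (offset : Int) : Int × Int :=
  match PySem.List.pyGet? data offset with
  | none => (0, 0)            -- IndexError (excluded by Pre_)
  | some fb =>
    match vint_width fb with
    | none => (0, 0)          -- ValueError (excluded by Pre_)
    | some (width, _) =>
      if offset + width > (data.length : Int) then (0, 0)    -- ValueError (excluded by Pre_)
      else
        ((PySem.List.pyRange 0 width 1).foldl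
            (fun value i => PySem.Int.bor (value <<< (8 : Nat)) (PySem.List.pyGetD data (offset + i) 0)) 0,
         width)

-- ===== PORT B =====
def read_element_id_py_alt (data : List Int) (offset : Int) : Int × Int :=
  match PySem.List.pyGet? data offset with
  | none => (0, 0)            -- IndexError (excluded by Pre_)
  | some fb =>
    let first := PySem.Int.band fb 255
    if first = 0 then (0, 0)  -- ValueError (excluded by Pre_)
    else
      let width : Int := 9 - (PySem.Int.bitLength first : Int)
      let start : Int := if 0 ≤ offset then offset else offset + (data.length : Int)
      if start + width > (data.length : Int) then (0, 0)     -- ValueError (excluded by Pre_)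
      else
        ((PySem.List.slice data (some start) (some (start + width))).foldl
            (fun value b => PySem.Int.bor (value <<< (8 : Nat)) b) 0,
         width)

-- ===== PRECONDITION & SPEC =====
-- Pre_ excludes (besides the inputs where A raises IndexError or ValueError) negative offsets whose
-- read would wrap past the end of the buffer: there A returns a value stitched from the buffer's
-- tail and head via per-index negative indexing, while B's normalized truncation check raises ValueError.
def Pre_read_element_id_py (data : List Int) (offset : Int) : Prop :=
  (PySem.List.pyGet? data offset).isSome = true ∧
  PySem.Int.band ((PySem.List.pyGet? data offset).getD 0) 255 ≠ 0 ∧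
  (if 0 ≤ offset then offset else offset + (data.length : Int)) +
      (9 - (PySem.Int.bitLength (PySem.Int.band ((PySem.List.pyGet? data offset).getD 0) 255) : Int))
    ≤ (data.length : Int)
instance (data : List Int) (offset : Int) : Decidable (Pre_read_element_id_py data offset) := by
  unfold Pre_read_element_id_py; infer_instance

def pvWitness_read_element_id_py : List Int × Int := ([129, 7], 0)

def Spec_read_element_id_py (data : List Int) (offset : Int) (out : Int × Int) : Prop := out = read_element_id_py_alt data offset
instance (data : List Int) (offset : Int) (out : Int × Int) : Decidable (Spec_read_element_id_py data offset out) := by unfold Spec_read_element_id_py; infer_instance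

-- ===== CLAIM (what is proved, stated in full; the proofs are below) =====
def Claim_equal_read_element_id_py : Prop := ∀ (data : List Int) (offset : Int), Dom_read_element_id_py data offset → Pre_read_element_id_py data offset → Spec_read_element_id_py data offset (read_element_id_py data offset)

-- ===== LEMMAS AND PROOFS =====

-- x &&& m only sees x's low 8 bits when m < 256
theorem nat_and_mod256 (x m : Nat) (hm : m < 256) : x &&& m = (x % 256) &&& m := by
  apply Nat.eq_of_testBit_eq
  intro i
  simp only [Nat.testBit_and]
  by_cases hi : i < 8
  · have h256 : (256 : Nat) = 2 ^ 8 := by norm_num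
    rw [h256, Nat.testBit_mod_two_pow]
    simp [hi]
  · have hmf : m.testBit i = false := by
      apply Nat.testBit_eq_false_of_lt
      calc m < 256 := hm
        _ = 2 ^ 8 := by norm_num
        _ ≤ 2 ^ i := Nat.pow_le_pow_right (by norm_num) (by omega)
    simp [hmf]

-- the bounded complement identity behind Python's a & m for negative a, for the masks A/B use
set_option maxRecDepth 2000 in
theorem nat_mask_compl : ∀ k < 256, ∀ m ∈ ([1, 2, 4, 8, 16, 32, 64, 128, 255] : List Nat),
    m - (m &&& k) = (255 - k) &&& m := by decide

-- Python's a & m depends only on a mod 256 for the masks A/B use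
theorem band_mask (a : Int) (m : Nat) (hmem : m ∈ ([1, 2, 4, 8, 16, 32, 64, 128, 255] : List Nat)) :
    PySem.Int.band a (m : Int) = (((PySem.Int.mod a 256).toNat &&& m : Nat) : Int) := by
  have hm : m < 256 := by fin_cases hmem <;> norm_num
  have hmod : PySem.Int.mod a 256 = a % 256 := PySem.Int.mod_eq_emod_of_pos (by norm_num)
  rw [hmod]
  unfold PySem.Int.band
  by_cases ha : 0 ≤ a
  · rw [if_pos ha, if_pos (by positivity : (0 : Int) ≤ (m : Int))]
    have h1 : (a % 256).toNat = a.toNat % 256 := by omega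
    have h2 : ((m : Int)).toNat = m := by omega
    rw [h1, h2, ← nat_and_mod256 a.toNat m hm]
  · rw [if_neg ha, if_pos (by positivity : (0 : Int) ≤ (m : Int))]
    have h2 : ((m : Int)).toNat = m := by omega
    have hn : ((-a - 1).toNat : Int) = -a - 1 := by omega
    have h3 : (a % 256).toNat = 255 - ((-a - 1).toNat % 256) := by omega
    rw [h2, h3, Nat.and_comm m (-a - 1).toNat, nat_and_mod256 _ m hm, Nat.and_comm _ m]
    rw [nat_mask_compl ((-a - 1).toNat % 256) (by omega) m hmem]

theorem band_low (a : Int) (m : Nat) (hmem : m ∈ ([1, 2, 4, 8, 16, 32, 64, 128, 255] : List Nat)) :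
    PySem.Int.band a (m : Int) = PySem.Int.band (((PySem.Int.mod a 256).toNat : Nat) : Int) (m : Int) := by
  rw [band_mask a m hmem, PySem.Int.band_natCast]

-- A's width loop and B's closed form agree on every byte residue, checked exhaustively
set_option maxRecDepth 8000 in
theorem key_bytes : ∀ r : Nat, r < 256 → 0 < r →
    1 ≤ PySem.Int.bitLength (r : Int) ∧ PySem.Int.bitLength (r : Int) ≤ 8 ∧
    vint_width (r : Int) = some (9 - (PySem.Int.bitLength (r : Int) : Int),
                                 (2 : Int) ^ (PySem.Int.bitLength (r : Int) - 1)) := by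
  decide

-- vintLoop only probes first_byte through band with the power masks 128 >> j
theorem vintLoop_congr (a b : Int)
    (h : ∀ m ∈ ([1, 2, 4, 8, 16, 32, 64, 128] : List Int), PySem.Int.band a m = PySem.Int.band b m) :
    ∀ (fuel : Nat) (mask width : Int), mask ∈ ([0, 1, 2, 4, 8, 16, 32, 64, 128] : List Int) →
      vintLoop a mask width fuel = vintLoop b mask width fuel := by
  intro fuel
  induction fuel with
  | zero => intro mask width _; rfl
  | succ n ih =>
    intro mask width hmask
    simp only [vintLoop]
    have hband : PySem.Int.band a mask = PySem.Int.band b mask := by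
      cases hmask with
      | head => simp
      | tail _ hrest => exact h mask hrest
    rw [hband]
    split_ifs with h1 h2
    · rfl
    · exact ih _ _ (by fin_cases hmask <;> decide)
    · rfl

theorem vint_width_eq (fb : Int) (h : PySem.Int.band fb 255 ≠ 0) :
    1 ≤ PySem.Int.bitLength (PySem.Int.band fb 255) ∧
    PySem.Int.bitLength (PySem.Int.band fb 255) ≤ 8 ∧
    vint_width fb = some (9 - (PySem.Int.bitLength (PySem.Int.band fb 255) : Int),
                          (2 : Int) ^ (PySem.Int.bitLength (PySem.Int.band fb 255) - 1)) := by
  have hr : (PySem.Int.mod fb 256).toNat < 256 := by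
    have := PySem.Int.mod_lt fb (b := 256) (by norm_num)
    omega
  have hb255 : PySem.Int.band fb 255 = ((PySem.Int.mod fb 256).toNat : Int) := by
    have h1 := band_mask fb 255 (by norm_num)
    have h2 : ((PySem.Int.mod fb 256).toNat &&& 255 : Nat) = (PySem.Int.mod fb 256).toNat := by
      have h255 : (255 : Nat) = 2 ^ 8 - 1 := by norm_num
      rw [h255, Nat.and_two_pow_sub_one_eq_mod]; omega
    rw [show ((255 : Nat) : Int) = (255 : Int) from by norm_num] at h1
    rw [h1, h2]
  have hr0 : 0 < (PySem.Int.mod fb 256).toNat := by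
    rcases Nat.eq_zero_or_pos (PySem.Int.mod fb 256).toNat with h0 | h0
    · exfalso; apply h; rw [hb255, h0]; rfl
    · exact h0
  have hcongr : vint_width fb = vint_width ((PySem.Int.mod fb 256).toNat : Int) := by
    apply vintLoop_congr _ _ _ 9 128 1 (by norm_num)
    intro m hm
    fin_cases hm
    · exact band_low fb 1 (by norm_num)
    · exact band_low fb 2 (by norm_num)
    · exact band_low fb 4 (by norm_num)
    · exact band_low fb 8 (by norm_num)
    · exact band_low fb 16 (by norm_num)
    · exact band_low fb 32 (by norm_num)
    · exact band_low fb 64 (by norm_num)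
    · exact band_low fb 128 (by norm_num)
  obtain ⟨k1, k2, k3⟩ := key_bytes (PySem.Int.mod fb 256).toNat hr hr0
  refine ⟨?_, ?_, ?_⟩
  · rw [hb255]; exact k1
  · rw [hb255]; exact k2
  · rw [hcongr, k3, hb255]

-- the bytes A reads per index are exactly B's slice, back-to-front of the two traversals
theorem chunk_eq (data : List Int) (offset : Int) (s Wn : Nat)
    (hsW : s + Wn ≤ data.length)
    (hidx : ∀ k : Nat, k < Wn → PySem.List.pyGetD data (offset + (k : Int)) 0 = data.getD (s + k) 0) :
    (data.drop s).take Wn = (List.range Wn).map (fun k : Nat => PySem.List.pyGetD data (offset + (k : Int)) 0) := by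
  apply List.ext_getElem
  · simp; omega
  · intro i h1 h2
    have hiW : i < Wn := by simpa using h2
    have hil : s + i < data.length := by omega
    simp only [List.getElem_take, List.getElem_drop, List.getElem_map, List.getElem_range]
    rw [hidx i hiW]
    simp [List.getD_eq_getElem?_getD, List.getElem?_eq_getElem hil]

theorem read_element_id_py_spec' (data : List Int) (offset : Int)
    (hpre : Pre_read_element_id_py data offset) :
    read_element_id_py data offset = read_element_id_py_alt data offset := by
  obtain ⟨h1, h2, h3⟩ := hpre
  obtain ⟨fb, hfb⟩ : ∃ fb, PySem.List.pyGet? data offset = some fb := Option.isSome_iff_exists.mp h1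
  rw [hfb] at h2 h3
  simp only [Option.getD_some] at h2 h3
  obtain ⟨hBL1, hBL8, hvw⟩ := vint_width_eq fb h2
  have hIR : PySem.Raise.InRange data.length offset := by
    by_contra hc
    rw [← PySem.List.pyGet?_eq_none_iff] at hc
    rw [hfb] at hc
    simp at hc
  obtain ⟨hlo, hhi⟩ := hIR
  -- abbreviations
  set BL := PySem.Int.bitLength (PySem.Int.band fb 255) with hBLdef
  set sInt : Int := if 0 ≤ offset then offset else offset + (data.length : Int) with hsdef
  have hs0 : 0 ≤ sInt := by rw [hsdef]; split_ifs with h <;> omega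
  set Wn : Nat := 9 - BL with hWdef
  have hWcast : ((Wn : Nat) : Int) = 9 - (BL : Int) := by omega
  have hsW : sInt.toNat + Wn ≤ data.length := by omega
  -- per-index agreement between A's data[offset + i] and B's slice elements
  have hidx : ∀ k : Nat, k < Wn →
      PySem.List.pyGetD data (offset + (k : Int)) 0 = data.getD (sInt.toNat + k) 0 := by
    intro k hk
    by_cases hoff : 0 ≤ offset
    · have hklen : offset + (k : Int) < (data.length : Int) := by
        rw [hsdef] at h3; rw [if_pos hoff] at h3; omega
      rw [PySem.List.pyGetD_eq_getElem data 0 (by omega) hklen]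
      have hidx2 : (offset + (k : Int)).toNat = sInt.toNat + k := by
        rw [hsdef, if_pos hoff]; omega
      have hlt : sInt.toNat + k < data.length := by omega
      simp only [hidx2]
      simp [List.getD_eq_getElem?_getD, List.getElem?_eq_getElem hlt]
    · -- offset < 0 and (by Pre_) offset + width ≤ 0: every index is a negative Python index
      have hneg : offset + (k : Int) < 0 := by
        rw [hsdef] at h3; rw [if_neg hoff] at h3; omega
      set kp : Nat := (-(offset + (k : Int))).toNat with hkpdef
      have hcast : offset + (k : Int) = -((kp : Nat) : Int) := by omega
      have hkp0 : 0 < kp := by omega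
      have hkplen : kp ≤ data.length := by omega
      rw [hcast, PySem.List.pyGetD_neg_natCast data kp 0 hkp0 hkplen]
      have hidx2 : data.length - kp = sInt.toNat + k := by
        rw [hsdef, if_neg hoff] at *; omega
      have hlt : sInt.toNat + k < data.length := by omega
      simp only [hidx2]
      simp [List.getD_eq_getElem?_getD, List.getElem?_eq_getElem hlt]
  -- evaluate both ports
  simp only [read_element_id_py, read_element_id_py_alt, hfb, hvw]
  rw [if_neg h2]
  have hAguard : ¬ (offset + (9 - (BL : Int)) > (data.length : Int)) := by
    rw [hsdef] at h3; split_ifs at h3 with h <;> omega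
  have hBguard : ¬ (sInt + (9 - (BL : Int)) > (data.length : Int)) := by omega
  rw [if_neg hAguard]
  simp only [← hsdef, ← hBLdef]
  rw [if_neg hBguard]
  refine Prod.ext ?_ rfl
  -- the two folds
  have hslice : PySem.List.slice data (some sInt) (some (sInt + (9 - (BL : Int)))) =
      (data.drop sInt.toNat).take Wn := by
    rw [PySem.List.slice_toNat data hs0 (by omega)]
    congr 1
    omega
  rw [hslice, chunk_eq data offset sInt.toNat Wn hsW hidx]
  rw [show (9 - (BL : Int)) = ((Wn : Nat) : Int) from by omega]
  rw [PySem.List.pyRange_zero_nat]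
  simp only [List.foldl_map]

-- ===== VERDICT (by name: the statement is the Claim_ definition above) =====
theorem read_element_id_py_spec : Claim_equal_read_element_id_py := by
  intro data offset _ hpre
  exact read_element_id_py_spec' data offset hpre
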